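-- pv_equiv track=rewrite | github.com/Rahulnisanth/Complete-Python-Hub | Data-Structures/Queue/card-deck-order-game.py | rearrange_cards
-- ===== SOURCE A (Python) =====
-- from collections import deque
--
-- def rearrange_cards(deck, N) -> list:
--     deck.sort()
--     result = [0] * N
--     indices = deque()
--     for i in range(N):
--         indices.append(i)
--     # Main play :
--     for card in deck:
--         idx = indices.popleft()
--         result[idx] = card
--         if indices:
--             indices.append(indices.popleft())
--     return result
-- ===== SOURCE B (Python) =====
-- from collections import deque
--
-- def rearrange_cards(deck, N) -> list:
--     """Deal the sorted deck over N slots in deck-reveal order: the k-th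
--     smallest card lands on the slot of the k-th reveal; any slot the deal
--     never reaches holds 0.  Built by the reverse simulation: walk the slots
--     from the last dealt card back to the first, undoing one rotation of the
--     deque before placing each card on top."""
--     deck.sort()
--     d = deque()
--     for k in reversed(range(N)):
--         if d:
--             d.appendleft(d.pop())
--         d.appendleft(deck[k] if k < len(deck) else 0)
--     return list(d)
-- ===== Notes on version B (the rewrite author's own statement) =====
-- stated objective: simpler
-- what changed: B replaces A's forward simulation over an auxiliary deque of result indices plus a preallocated result array with the standard reverse simulation that builds the arrangement directly in one deque, walking the slots from last to first; Pre_ excludes only the inputs where A raises IndexError (a nonempty deck with more cards than N slots).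
import Mathlib
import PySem

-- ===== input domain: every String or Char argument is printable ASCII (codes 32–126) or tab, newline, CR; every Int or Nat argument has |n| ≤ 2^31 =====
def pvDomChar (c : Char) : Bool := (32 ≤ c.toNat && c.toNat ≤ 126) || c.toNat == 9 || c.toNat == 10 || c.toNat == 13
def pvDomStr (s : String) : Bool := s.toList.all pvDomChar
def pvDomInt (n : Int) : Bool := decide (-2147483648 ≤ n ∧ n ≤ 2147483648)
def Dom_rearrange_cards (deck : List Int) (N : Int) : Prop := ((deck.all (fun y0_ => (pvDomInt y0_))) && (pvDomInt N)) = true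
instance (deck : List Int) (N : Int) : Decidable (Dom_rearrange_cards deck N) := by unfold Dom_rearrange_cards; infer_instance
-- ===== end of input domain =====

-- B replaces A's forward index-deque simulation with the reverse one-deque simulation
-- over the N slots (objective: simpler).  Python A sorts `deck` in place; the equivalence
-- proved here is about the RETURN value (B performs the same in-place sort).

-- ===== PORT A =====
-- one step of A's main loop; state = (result, indices deque).
-- indices come from range(N), so they are nonnegative and `.toNat` is exact;
-- on an exhausted deque Python raises IndexError (excluded by Pre_), here a no-op.
def pvStepA (st : List Int × List Int) (card : Int) : List Int × List Int :=
  match st with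
  | (result, []) => (result, [])
  | (result, idx :: rest) =>
      let result' := result.set idx.toNat card
      match rest with
      | [] => (result', [])
      | j :: rest' => (result', rest' ++ [j])

def rearrange_cards (deck : List Int) (N : Int) : List Int :=
  let deckS := PySem.List.sorted deck (fun x => x) false
  let result : List Int := List.replicate N.toNat 0
  let indices := PySem.List.pyRange 0 N 1
  (deckS.foldl pvStepA (result, indices)).1

-- ===== PORT B =====
-- one step of B's loop body: `if d: d.appendleft(d.pop())` then `d.appendleft(card)`.
def pvStepB (d : List Int) (card : Int) : List Int :=
  let d' := if d.isEmpty then d else d.getLast! :: d.dropLast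
  card :: d'

-- `for k in reversed(range(N))`, placing `deck[k] if k < len(deck) else 0`;
-- the guard keeps the index in range, so `[k.toNat]?.getD 0` is Python's `deck[k]` exactly.
def rearrange_cards_alt (deck : List Int) (N : Int) : List Int :=
  let deckS := PySem.List.sorted deck (fun x => x) false
  (PySem.List.pyRange 0 N 1).reverse.foldl
    (fun d k => pvStepB d (if k < (deckS.length : Int) then deckS[k.toNat]?.getD 0 else 0)) []

-- ===== PRECONDITION & SPEC =====
-- Pre_ excludes exactly the inputs on which A raises IndexError:
-- a nonempty deck with more cards than N index slots.
def Pre_rearrange_cards (deck : List Int) (N : Int) : Prop :=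
  (deck.length : Int) ≤ N ∨ deck = []
instance (deck : List Int) (N : Int) : Decidable (Pre_rearrange_cards deck N) := by
  unfold Pre_rearrange_cards; infer_instance

def pvWitness_rearrange_cards : List Int × Int := ([3, 1, 2], 3)

def Spec_rearrange_cards (deck : List Int) (N : Int) (out : List Int) : Prop := out = rearrange_cards_alt deck N
instance (deck : List Int) (N : Int) (out : List Int) : Decidable (Spec_rearrange_cards deck N out) := by unfold Spec_rearrange_cards; infer_instance

-- ===== CLAIM (what is proved, stated in full; the proofs are below) =====
def Claim_equal_rearrange_cards : Prop := ∀ (deck : List Int) (N : Int), Dom_rearrange_cards deck N → Pre_rearrange_cards deck N → Spec_rearrange_cards deck N (rearrange_cards deck N)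

-- ===== LEMMAS AND PROOFS =====

-- B's recursion read top-down: rsim (x :: rest) applies pvStepB last-to-first.
def rsim : List Int → List Int
  | [] => []
  | x :: rest => pvStepB (rsim rest) x

theorem foldl_stepB_reverse (l : List Int) :
    l.reverse.foldl pvStepB [] = rsim l := by
  induction l with
  | nil => rfl
  | cons x rest ih =>
      simp [List.reverse_cons, List.foldl_append, ih, rsim]

theorem foldl_stepB_comp (f : Int → Int) (l : List Int) (init : List Int) :
    l.foldl (fun d k => pvStepB d (f k)) init = (l.map f).foldl pvStepB init := by
  induction l generalizing init with
  | nil => rfl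
  | cons x rest ih => simp [List.foldl_cons, ih]

-- reading slot k's card through the guard reconstructs the sorted deck padded with zeros
theorem map_range_pad (s : List Int) (n : Nat) (hL : s.length ≤ n) :
    (List.range n).map (fun k : Nat =>
        (fun k : Int => if k < (s.length : Int) then s[k.toNat]?.getD 0 else 0) (k : Int))
      = s ++ List.replicate (n - s.length) 0 := by
  apply List.ext_getElem
  · simp; omega
  · intro i h1 h2
    simp only [List.getElem_map, List.getElem_range]
    by_cases hi : i < s.length
    · have hc : ((i : Nat) : Int) < (s.length : Int) := by exact_mod_cast hi
      rw [if_pos hc, List.getElem_append_left hi]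
      simp [List.getElem?_eq_getElem hi]
    · have hc : ¬ ((i : Nat) : Int) < (s.length : Int) := by exact_mod_cast hi
      rw [if_neg hc, List.getElem_append_right (le_of_not_gt hi)]
      simp

-- B's reverse loop over the slots equals the reverse fold over the padded sorted deck
theorem alt_eq_pad (deck : List Int) (N : Int)
    (hpre : (deck.length : Int) ≤ N ∨ deck = []) :
    rearrange_cards_alt deck N =
      ((PySem.List.sorted deck (fun x => x) false)
        ++ List.replicate (N - (deck.length : Int)).toNat 0).reverse.foldl pvStepB [] := by
  unfold rearrange_cards_alt
  dsimp only
  set s := PySem.List.sorted deck (fun x => x) false with hs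
  have hslen : s.length = deck.length := by rw [hs]; exact PySem.List.length_sorted ..
  have hq : PySem.List.pyRange 0 N 1 =
      (List.range N.toNat).map (fun k : Nat => (k : Int)) := by
    rw [PySem.List.pyRange_one]
    simp only [Int.sub_zero, Int.zero_add]
  have hL : s.length ≤ N.toNat := by
    rcases hpre with h | h
    · omega
    · rw [hslen, h]; simp
  have hz : (N - (deck.length : Int)).toNat = N.toNat - s.length := by
    rcases hpre with h | h
    · omega
    · rw [hslen, h]; simp
  rw [foldl_stepB_comp (fun k : Int => if k < (s.length : Int) then s[k.toNat]?.getD 0 else 0),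
      List.map_reverse, hq, List.map_map, Function.comp_def,
      map_range_pad s N.toNat hL, hz]

theorem length_pvStepB (d : List Int) (c : Int) :
    (pvStepB d c).length = d.length + 1 := by
  cases d with
  | nil => rfl
  | cons a t => simp [pvStepB]

theorem rsim_length (l : List Int) : (rsim l).length = l.length := by
  induction l with
  | nil => rfl
  | cons x rest ih => simp [rsim, length_pvStepB, ih]

theorem pv_set_self (l : List Int) (n : Nat) (a : Int) (h : l[n]? = some a) :
    l.set n a = l := by
  have hn : n < l.length := by
    by_contra hc
    simp [List.getElem?_eq_none (le_of_not_gt hc)] at h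
  have hv : l[n] = a := by
    have hg := List.getElem?_eq_getElem hn (l := l)
    rw [hg] at h; exact Option.some_inj.mp h
  subst hv
  exact List.set_getElem_self ..

-- writing only zeros into slots that already hold 0 leaves the result unchanged
theorem foldl_stepA_zeros (cards q res : List Int)
    (hz : ∀ c ∈ cards, c = 0) (h0 : ∀ i ∈ q, res[i.toNat]? = some 0) :
    (cards.foldl pvStepA (res, q)).1 = res := by
  induction cards generalizing q res with
  | nil => rfl
  | cons c cs ih =>
      have hc0 : c = 0 := hz c (List.mem_cons_self ..)
      have hz' : ∀ x ∈ cs, x = 0 := fun x hx => hz x (List.mem_cons_of_mem _ hx)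
      cases q with
      | nil =>
          show (cs.foldl pvStepA (pvStepA (res, []) c)).1 = res
          have hstep : pvStepA (res, []) c = (res, []) := rfl
          rw [hstep]
          exact ih [] res hz' (by intro i hi; cases hi)
      | cons q0 q' =>
          have hset : res.set q0.toNat c = res := by
            rw [hc0]; exact pv_set_self _ _ _ (h0 q0 (List.mem_cons_self ..))
          cases q' with
          | nil =>
              show (cs.foldl pvStepA (pvStepA (res, [q0]) c)).1 = res
              have hstep : pvStepA (res, [q0]) c = (res, []) := by
                simp [pvStepA, hset]
              rw [hstep]
              exact ih [] res hz' (by intro i hi; cases hi)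
          | cons j r =>
              show (cs.foldl pvStepA (pvStepA (res, q0::j::r) c)).1 = res
              have hstep : pvStepA (res, q0::j::r) c = (res, r ++ [j]) := by
                simp [pvStepA, hset]
              rw [hstep]
              refine ih (r ++ [j]) res hz' ?_
              intro i hi
              apply h0
              rcases List.mem_append.mp hi with h | h
              · exact List.mem_cons_of_mem _ (List.mem_cons_of_mem _ h)
              · simp at h; subst h
                exact List.mem_cons_of_mem _ (List.mem_cons_self ..)

-- slots still in the deque after the fold are original slots, never written
theorem foldl_stepA_inv (cards q res : List Int)
    (hnd : (q.map (·.toNat)).Nodup) :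
    ∀ i ∈ (cards.foldl pvStepA (res, q)).2,
      i ∈ q ∧ (cards.foldl pvStepA (res, q)).1[i.toNat]? = res[i.toNat]? := by
  induction cards generalizing q res with
  | nil => exact fun i hi => ⟨hi, rfl⟩
  | cons c cs ih =>
      cases q with
      | nil =>
          have hstep : pvStepA (res, []) c = (res, []) := rfl
          simp only [List.foldl_cons, hstep]
          intro i hi
          exact ih [] res (by simp) i hi
      | cons q0 q' =>
          have hq0 : q0.toNat ∉ q'.map (·.toNat) := by
            simp only [List.map_cons, List.nodup_cons] at hnd; exact hnd.1
          have hnd' : (q'.map (·.toNat)).Nodup := by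
            simp only [List.map_cons, List.nodup_cons] at hnd; exact hnd.2
          have hne : ∀ i ∈ q', i.toNat ≠ q0.toNat := by
            intro i hi hcontra
            exact hq0 (hcontra ▸ List.mem_map_of_mem hi)
          cases q' with
          | nil =>
              have hstep : pvStepA (res, [q0]) c = (res.set q0.toNat c, []) := by
                simp [pvStepA]
              simp only [List.foldl_cons, hstep]
              intro i hi
              rcases ih [] (res.set q0.toNat c) (by simp) i hi with ⟨hmem, _⟩
              cases hmem
          | cons j r =>
              have hstep : pvStepA (res, q0::j::r) c = (res.set q0.toNat c, r ++ [j]) := by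
                simp [pvStepA]
              simp only [List.foldl_cons, hstep]
              intro i hi
              have hndr : ((r ++ [j]).map (·.toNat)).Nodup := by
                have : ((r ++ [j]).map (·.toNat)).Perm ((j :: r).map (·.toNat)) :=
                  (List.perm_append_singleton _ _).map _
                exact this.nodup_iff.mpr hnd'
              rcases ih (r ++ [j]) (res.set q0.toNat c) hndr i hi with ⟨hmem, heq⟩
              have hiq' : i ∈ j :: r := by
                rcases List.mem_append.mp hmem with h | h
                · exact List.mem_cons_of_mem _ h
                · simp at h; subst h; exact List.mem_cons_self ..
              refine ⟨List.mem_cons_of_mem _ hiq', ?_⟩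
              rw [heq]
              exact List.getElem?_set_ne (Ne.symm (hne i hiq'))

theorem pv_getLast! (d : List Int) (h : d ≠ []) :
    d[d.length - 1]? = some d.getLast! := by
  have hl : 0 < d.length := List.length_pos_iff.mpr h
  rw [List.getLast!_eq_getElem!]
  have h1 : d.length - 1 < d.length := by omega
  simp [List.getElem!_eq_getElem?_getD, List.getElem?_eq_getElem h1]

-- the key correspondence: A's forward simulation scatters exactly rsim cards
theorem foldl_stepA_rsim (cards q res : List Int)
    (hlen : cards.length = q.length) (hnd : (q.map (·.toNat)).Nodup)
    (hval : ∀ i ∈ q, i.toNat < res.length) :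
    (cards.foldl pvStepA (res, q)).1.length = res.length ∧
    (∀ (j : Nat) (i : Int), q[j]? = some i →
        (cards.foldl pvStepA (res, q)).1[i.toNat]? = (rsim cards)[j]?) ∧
    (∀ p : Nat, p ∉ q.map (·.toNat) →
        (cards.foldl pvStepA (res, q)).1[p]? = res[p]?) := by
  induction cards generalizing q res with
  | nil =>
      have hq : q = [] := List.length_eq_zero_iff.mp (by simpa using hlen.symm)
      subst hq
      exact ⟨rfl, fun j i hj => by simp at hj, fun p _ => rfl⟩
  | cons x cs ih =>
      cases q with
      | nil => simp at hlen
      | cons q0 q' =>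
        have hq0 : q0.toNat ∉ q'.map (·.toNat) := by
          simp only [List.map_cons, List.nodup_cons] at hnd; exact hnd.1
        have hnd' : (q'.map (·.toNat)).Nodup := by
          simp only [List.map_cons, List.nodup_cons] at hnd; exact hnd.2
        have hval0 : q0.toNat < res.length := hval q0 (List.mem_cons_self ..)
        cases q' with
        | nil =>
            have hcs : cs = [] := List.length_eq_zero_iff.mp (by simpa using hlen)
            subst hcs
            have hstep : pvStepA (res, [q0]) x = (res.set q0.toNat x, []) := by
              simp [pvStepA]
            simp only [List.foldl_cons, hstep, List.foldl_nil]
            refine ⟨by simp, ?_, ?_⟩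
            · intro j i hj
              cases j with
              | zero =>
                  simp at hj; subst hj
                  simp [rsim, pvStepB, hval0]
              | succ k => simp at hj
            · intro p hp
              simp at hp
              exact List.getElem?_set_ne (by omega)
        | cons j0 r =>
            have hlcs : cs.length = r.length + 1 := by simpa using hlen
            have hstep : pvStepA (res, q0::j0::r) x = (res.set q0.toNat x, r ++ [j0]) := by
              simp [pvStepA]
            simp only [List.foldl_cons, hstep]
            have hperm : ((r ++ [j0]).map (·.toNat)).Perm ((j0 :: r).map (·.toNat)) :=
              (List.perm_append_singleton _ _).map _
            have hmem_rot : ∀ i, i ∈ r ++ [j0] ↔ i ∈ j0 :: r := by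
              intro i
              constructor
              · intro h
                rcases List.mem_append.mp h with h | h
                · exact List.mem_cons_of_mem _ h
                · simp at h; subst h; exact List.mem_cons_self ..
              · intro h
                rcases List.mem_cons.mp h with h | h
                · subst h; exact List.mem_append.mpr (Or.inr (by simp))
                · exact List.mem_append.mpr (Or.inl h)
            obtain ⟨ihlen, ihq, ihout⟩ :=
              ih (r ++ [j0]) (res.set q0.toNat x)
                (by simpa using hlcs)
                (hperm.nodup_iff.mpr hnd')
                (by
                  intro i hi
                  rw [List.length_set]
                  exact hval i (List.mem_cons_of_mem _ ((hmem_rot i).mp hi)))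
            have hd : (rsim cs).length = r.length + 1 := (rsim_length cs).trans hlcs
            have hdne : rsim cs ≠ [] := by
              intro hcon; rw [hcon] at hd; simp at hd
            have hrsim : rsim (x :: cs) =
                x :: (rsim cs).getLast! :: (rsim cs).dropLast := by
              simp only [rsim, pvStepB]
              rw [if_neg (by simp [List.isEmpty_iff, hdne])]
            refine ⟨ihlen.trans (by simp), ?_, ?_⟩
            · intro j i hj
              cases j with
              | zero =>
                  simp at hj; subst hj
                  have hnotin : q0.toNat ∉ (r ++ [j0]).map (·.toNat) := fun hc =>
                    hq0 (hperm.mem_iff.mp hc)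
                  rw [ihout _ hnotin, hrsim]
                  simp [hval0]
              | succ k =>
                cases k with
                | zero =>
                    simp at hj; subst hj
                    have hidx : (r ++ [j0])[r.length]? = some j0 := by simp
                    rw [ihq r.length j0 hidx, hrsim]
                    have : (rsim cs)[r.length]? = some (rsim cs).getLast! := by
                      have := pv_getLast! (rsim cs) hdne
                      rwa [hd] at this
                    simpa using this
                | succ k' =>
                    have hj' : r[k']? = some i := by simpa using hj
                    have hk' : k' < r.length := by
                      by_contra hc
                      rw [List.getElem?_eq_none (le_of_not_gt hc)] at hj'
                      cases hj'
                    have hidx : (r ++ [j0])[k']? = some i := by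
                      rw [List.getElem?_append_left hk']; exact hj'
                    rw [ihq k' i hidx, hrsim]
                    have hdk : (rsim cs).dropLast[k']? = (rsim cs)[k']? := by
                      rw [List.getElem?_dropLast]
                      simp [hd, hk']
                    simp [hdk]
            · intro p hp
              rw [List.map_cons, List.mem_cons] at hp
              push Not at hp
              obtain ⟨hp0, hp2⟩ := hp
              have hp1 : p ∉ (r ++ [j0]).map (·.toNat) := fun hc =>
                hp2 (hperm.mem_iff.mp hc)
              rw [ihout p hp1]
              exact List.getElem?_set_ne (by omega)

-- ===== VERDICT (by name: the statement is the Claim_ definition above) =====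
theorem rearrange_cards_spec : Claim_equal_rearrange_cards := by
  intro deck N _dom hpre
  unfold Spec_rearrange_cards
  rw [alt_eq_pad deck N hpre, foldl_stepB_reverse]
  unfold rearrange_cards
  dsimp only
  set s := PySem.List.sorted deck (fun x => x) false with hs
  have hslen : s.length = deck.length := by
    rw [hs]; exact PySem.List.length_sorted ..
  by_cases hN : 0 ≤ N
  · -- general case: 0 ≤ N and deck.length ≤ N
    have hmn : deck.length ≤ N.toNat := by
      rcases hpre with h | h
      · omega
      · subst h; simp
    set n := N.toNat with hn
    set q := PySem.List.pyRange 0 N 1 with hqdef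
    set res0 : List Int := List.replicate n 0 with hres0
    set zs : List Int := List.replicate (N - (deck.length : Int)).toNat 0 with hzs
    have hq : q = (List.range n).map (fun (k : Nat) => (k : Int)) := by
      rw [hqdef, PySem.List.pyRange_one]
      simp only [Int.sub_zero, Int.zero_add]
      rfl
    have hqlen : q.length = n := by simp [hq]
    have hqget : ∀ j, j < n → q[j]? = some (j : Int) := by
      intro j hj
      rw [hq, List.getElem?_map, List.getElem?_range hj]
      rfl
    have hqmapnat : q.map (·.toNat) = List.range n := by
      rw [hq, List.map_map]
      simp only [Function.comp_def, Int.toNat_natCast]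
      exact List.map_id' _
    have hnd : (q.map (·.toNat)).Nodup := by rw [hqmapnat]; exact List.nodup_range
    have hmemq : ∀ i ∈ q, 0 ≤ i ∧ i < N := by
      intro i hi
      rw [hqdef] at hi
      exact PySem.List.mem_pyRange_one.mp hi
    have hvalq : ∀ i ∈ q, i.toNat < res0.length := by
      intro i hi
      rcases hmemq i hi with ⟨h0, h1⟩
      simp only [hres0, List.length_replicate]
      omega
    have hzslen : zs.length = n - s.length := by
      simp only [hzs, List.length_replicate]
      omega
    have hplen : (s ++ zs).length = n := by
      rw [List.length_append, hzslen]; omega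
    -- A's result is unchanged by appending the zero cards
    have hApad : ((s ++ zs).foldl pvStepA (res0, q)).1 =
        (s.foldl pvStepA (res0, q)).1 := by
      rw [List.foldl_append]
      have hinv := foldl_stepA_inv s q res0 hnd
      have h0 : ∀ i ∈ (s.foldl pvStepA (res0, q)).2,
          (s.foldl pvStepA (res0, q)).1[i.toNat]? = some 0 := by
        intro i hi
        rcases hinv i hi with ⟨hiq, heq⟩
        rw [heq, hres0]
        rw [List.getElem?_replicate]
        simp only [hres0, List.length_replicate] at hvalq
        simp [hvalq i hiq]
      have := foldl_stepA_zeros zs (s.foldl pvStepA (res0, q)).2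
        (s.foldl pvStepA (res0, q)).1
        (by intro c hc; exact (List.eq_of_mem_replicate (hzs ▸ hc)))
        h0
      simpa using this
    obtain ⟨hlenA, hscatter, _⟩ := foldl_stepA_rsim (s ++ zs) q res0
      (by rw [hplen, hqlen]) hnd hvalq
    rw [← hApad]
    have hlenB : (rsim (s ++ zs)).length = n := by
      rw [rsim_length, hplen]
    apply List.ext_getElem?
    intro i
    by_cases hi : i < n
    · have := hscatter i (i : Int) (hqget i hi)
      simpa using this
    · rw [List.getElem?_eq_none, List.getElem?_eq_none]
      · omega
      · rw [hlenA, hres0, List.length_replicate]; omega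
  · -- N < 0: Pre_ forces deck = []
    have hdeck : deck = [] := by
      rcases hpre with h | h
      · exfalso; omega
      · exact h
    subst hdeck
    have hs0 : s = [] := by rw [hs]; rfl
    have hN0 : N.toNat = 0 := by omega
    simp [hs0, hN0, rsim]
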